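-- pv_equiv track=rewrite | github.com/McAle16/process-wallpaper | generateWallpaper.py | getProcessDictionary
-- ===== SOURCE A (Python) =====
-- def getProcessDictionary(process_list):
--   processDictionary = {}
--
--   for process, cpu, mem in process_list:
--     if process in processDictionary:
--       processDictionary[process][0] += cpu
--       processDictionary[process][1] += mem
--     else:
--       processDictionary[process] = [cpu + 1, mem + 1]
--
--   return processDictionary
-- ===== SOURCE B (Python) =====
-- def getProcessDictionary(process_list):
--   groups = {}
--   for process, cpu, mem in process_list:
--     groups.setdefault(process, []).append((cpu, mem))
--   return {name: [sum(c for c, _ in rows) + 1, sum(m for _, m in rows) + 1]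
--           for name, rows in groups.items()}
-- ===== Notes on version B (the rewrite author's own statement) =====
-- stated objective: alternative
-- what changed: Replaces A's interleaved accumulate-or-initialize branch with a two-phase group-then-reduce: one pass groups rows by name, a second pass sums each group's cpu/mem and adds 1 once per name.
import Mathlib
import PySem

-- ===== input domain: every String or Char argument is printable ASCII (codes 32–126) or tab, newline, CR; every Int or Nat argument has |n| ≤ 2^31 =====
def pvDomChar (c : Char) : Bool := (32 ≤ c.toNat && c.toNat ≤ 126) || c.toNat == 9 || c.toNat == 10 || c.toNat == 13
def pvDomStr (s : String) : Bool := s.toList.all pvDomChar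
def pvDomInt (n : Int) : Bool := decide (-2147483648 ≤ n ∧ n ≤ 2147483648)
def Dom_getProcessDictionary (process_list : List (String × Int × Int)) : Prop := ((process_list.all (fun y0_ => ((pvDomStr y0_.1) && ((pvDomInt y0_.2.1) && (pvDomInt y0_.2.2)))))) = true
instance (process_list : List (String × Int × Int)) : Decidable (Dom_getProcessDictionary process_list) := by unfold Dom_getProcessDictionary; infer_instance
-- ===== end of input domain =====

-- B replaces A's interleaved accumulate-or-initialize branch with a two-phase
-- group-then-reduce (group rows by name, then sum each group and add 1 once);
-- objective: alternative decomposition, same cost.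

-- ===== PORT A =====
-- one loop step of A: branch on membership, mutate the 2-element list or initialize it
def pvStepA (d : PySem.Dict String (List Int)) (row : String × Int × Int) : PySem.Dict String (List Int) :=
  match row with
  | (process, cpu, mem) =>
    if d.contains process then
      -- processDictionary[process][0] += cpu ; processDictionary[process][1] += mem
      -- (entries are always length-2 lists, so the indexed updates never go out of range;
      --  List.set/getD are exact here)
      let v := d.getD process []
      let v1 := v.set 0 (v.getD 0 0 + cpu)
      let v2 := v1.set 1 (v1.getD 1 0 + mem)
      d.insert process v2
    else
      d.insert process [cpu + 1, mem + 1]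

def getProcessDictionary (process_list : List (String × Int × Int)) : List (String × List Int) :=
  (process_list.foldl pvStepA PySem.Dict.empty).items

-- ===== PORT B =====
-- phase 1: groups.setdefault(process, []).append((cpu, mem)), i.e. groups[process] = groups.get(process, []) + [(cpu, mem)]
def pvGroup (process_list : List (String × Int × Int)) : PySem.Dict String (List (Int × Int)) :=
  process_list.foldl (fun d row => d.modify row.1 [] (· ++ [row.2])) PySem.Dict.empty

-- phase 2: {name: [sum(c) + 1, sum(m) + 1] for name, rows in groups.items()}
def pvReduce (rows : List (Int × Int)) : List Int :=
  [(rows.map (·.1)).sum + 1, (rows.map (·.2)).sum + 1]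

def getProcessDictionary_alt (process_list : List (String × Int × Int)) : List (String × List Int) :=
  (pvGroup process_list).items.map (fun p => (p.1, pvReduce p.2))

-- ===== PRECONDITION & SPEC =====
def Spec_getProcessDictionary (process_list : List (String × Int × Int)) (out : List (String × List Int)) : Prop := out = getProcessDictionary_alt process_list
instance (process_list : List (String × Int × Int)) (out : List (String × List Int)) : Decidable (Spec_getProcessDictionary process_list out) := by unfold Spec_getProcessDictionary; infer_instance

-- ===== CLAIM (what is proved, stated in full; the proofs are below) =====
def Claim_equal_getProcessDictionary : Prop := ∀ (process_list : List (String × Int × Int)), Dom_getProcessDictionary process_list → Spec_getProcessDictionary process_list (getProcessDictionary process_list)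

-- ===== LEMMAS AND PROOFS =====

-- the reduction map applied to a dict's items, as an items-level relation
-- relating A's accumulator to B's grouping accumulator
def pvRel (dA : PySem.Dict String (List Int)) (dG : PySem.Dict String (List (Int × Int))) : Prop :=
  dA.items = dG.items.map (fun p => (p.1, pvReduce p.2))

lemma pv_get?_rel (dA : PySem.Dict String (List Int)) (dG : PySem.Dict String (List (Int × Int)))
    (h : pvRel dA dG) (k : String) : dA.get? k = (dG.get? k).map pvReduce := by
  simp only [PySem.Dict.get?, pvRel] at *
  rw [h, List.find?_map]
  have hcomp : ((fun p : String × List Int => p.1 == k) ∘ fun p : String × List (Int × Int) => (p.1, pvReduce p.2)) = fun p => p.1 == k := rfl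
  rw [hcomp]
  cases dG.items.find? (fun p => p.1 == k) <;> rfl

lemma pv_contains_rel (dA : PySem.Dict String (List Int)) (dG : PySem.Dict String (List (Int × Int)))
    (h : pvRel dA dG) (k : String) : dA.contains k = dG.contains k := by
  rw [PySem.Dict.contains_eq_isSome_get?, PySem.Dict.contains_eq_isSome_get?, pv_get?_rel dA dG h k]
  cases dG.get? k <;> rfl

lemma pv_inv (l : List (String × Int × Int)) (dA : PySem.Dict String (List Int))
    (dG : PySem.Dict String (List (Int × Int))) (h : pvRel dA dG) :
    pvRel (l.foldl pvStepA dA) (l.foldl (fun d row => d.modify row.1 [] (· ++ [row.2])) dG) := by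
  induction l generalizing dA dG with
  | nil => exact h
  | cons row t ih =>
    obtain ⟨process, cpu, mem⟩ := row
    simp only [List.foldl_cons]
    apply ih
    by_cases hc : dG.contains process = true
    · -- key already present: A updates [c+1, m+1] to [c+1+cpu, m+1+mem], B appends the row
      obtain ⟨rows, hrows⟩ : ∃ rows, dG.get? process = some rows := by
        rw [PySem.Dict.contains_eq_isSome_get?] at hc
        exact Option.isSome_iff_exists.mp hc
      have hcA : dA.contains process = true := (pv_contains_rel dA dG h process).trans hc
      have hgA : dA.getD process [] = pvReduce rows := by
        rw [PySem.Dict.getD_eq_get?_getD, pv_get?_rel dA dG h process, hrows]; rfl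
      have hgG : dG.getD process [] = rows := by
        rw [PySem.Dict.getD_eq_get?_getD, hrows]; rfl
      simp only [pvStepA, hcA, if_pos, PySem.Dict.modify, hgA, hgG, pvRel]
      rw [PySem.Dict.items_insert_of_contains _ _ hcA, PySem.Dict.items_insert_of_contains _ _ hc, h,
          List.map_map, List.map_map]
      apply List.map_congr_left
      intro p _
      by_cases hpk : (p.1 == process) = true
      · simp only [Function.comp, hpk, if_pos]
        refine congrArg (Prod.mk process) ?_
        simp [pvReduce]
        constructor <;> ring
      · simp [Function.comp, hpk]
    · -- fresh key: A initializes [cpu+1, mem+1], B starts the group with [(cpu, mem)]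
      have hcA : dA.contains process = false := by
        rw [pv_contains_rel dA dG h process]; exact eq_false_of_ne_true hc
      have hc' : dG.contains process = false := eq_false_of_ne_true hc
      simp only [pvStepA, hcA, if_neg, Bool.false_eq_true, not_false_iff, PySem.Dict.modify,
        PySem.Dict.getD_of_not_contains dG _ hc', pvRel]
      rw [PySem.Dict.items_insert_of_not_contains _ _ hcA,
          PySem.Dict.items_insert_of_not_contains _ _ hc', h, List.map_append]
      simp [pvReduce]

-- ===== VERDICT (by name: the statement is the Claim_ definition above) =====
theorem getProcessDictionary_spec : Claim_equal_getProcessDictionary := by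
  intro pl _
  show getProcessDictionary pl = getProcessDictionary_alt pl
  have h := pv_inv pl PySem.Dict.empty PySem.Dict.empty (by rfl)
  simpa [getProcessDictionary, getProcessDictionary_alt, pvGroup] using h
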